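-- pv_equiv track=rewrite | github.com/mashida/learn-python | 2024.10.11/task_01.py | join_similar_segments
-- ===== SOURCE A (Python) =====
-- def join_similar_segments(segments: list[str], seps: set[str]) -> list[str]:
--     if not segments:
--         return []
--
--     result: list[str] = ['']
--     for segment in segments:
--         result[-1] += segment
--         if segment[-1] in seps and segment is not segments[-1]:
--             result.append('')
--
--     return result
-- ===== SOURCE B (Python) =====
-- def join_similar_segments(segments: list[str], seps: set[str]) -> list[str]:
--     # Single right-to-left pass: collect the segments of the current (leftmost-so-far)
--     # chunk, flush it whenever a non-final separator-terminated segment starts a new one,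
--     # and reverse the chunk list at the end.
--     if not segments:
--         return []
--     chunks_rev: list[str] = []
--     cur: list[str] = []
--     for s in reversed(segments):
--         if cur and s[-1] in seps:
--             chunks_rev.append(''.join(reversed(cur)))
--             cur = [s]
--         else:
--             cur.append(s)
--     chunks_rev.append(''.join(reversed(cur)))
--     return chunks_rev[::-1]
-- ===== Notes on version B (the rewrite author's own statement) =====
-- stated objective: alternative
-- what changed: B replaces A's forward loop that mutates result[-1] and appends '' after break segments by a single right-to-left pass that collects the current chunk's segments, flushes a joined chunk at each non-final separator-terminated segment, and reverses the chunk list at the end.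
-- outside the precondition, e.g. on join_similar_segments(['a', ''], {'a'}): A raises IndexError, B returns ['a', '']; on join_similar_segments(['a', 'a'], {'a'}): A returns ['aa'], B returns ['a', 'a']
import Mathlib
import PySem

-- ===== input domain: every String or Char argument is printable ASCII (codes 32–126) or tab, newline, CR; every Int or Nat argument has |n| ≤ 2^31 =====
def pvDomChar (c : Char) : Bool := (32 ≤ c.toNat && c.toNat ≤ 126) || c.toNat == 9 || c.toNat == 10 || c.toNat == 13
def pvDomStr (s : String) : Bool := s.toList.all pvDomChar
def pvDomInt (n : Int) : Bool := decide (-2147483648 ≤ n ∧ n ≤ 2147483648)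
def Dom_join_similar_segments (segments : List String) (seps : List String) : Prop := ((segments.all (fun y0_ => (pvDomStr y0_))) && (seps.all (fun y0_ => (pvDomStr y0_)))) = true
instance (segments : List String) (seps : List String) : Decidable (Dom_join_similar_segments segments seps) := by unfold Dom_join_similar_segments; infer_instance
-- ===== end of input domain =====

-- B replaces A's forward loop that mutates result[-1] by a single right-to-left pass that
-- builds the chunk list back-to-front (objective: alternative decomposition, same cost).

-- shared helper for the Python expression `s[-1] in seps` (false when s = "", where Python
-- raises IndexError; such inputs are outside Pre_)
def pvBrk (s : String) (seps : List String) : Bool :=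
  match PySem.Str.pyGet? s (-1) with
  | some c => seps.contains (String.ofList [c])
  | none => false

-- ===== PORT A =====
-- `segment is not segments[-1]` is ported as string inequality with the last element; this
-- is exact on Pre_ (the last element does not occur earlier, so identity = position = value).
def join_similar_segments (segments : List String) (seps : List String) : List String :=
  if segments = [] then []
  else
    segments.foldl (fun result segment =>
      let result := result.dropLast ++ [result.getLastD "" ++ segment]   -- result[-1] += segment
      if pvBrk segment seps && segment != segments.getLastD "" then result ++ [""] else result)
      [""]

-- ===== PORT B =====
def join_similar_segments_alt (segments : List String) (seps : List String) : List String :=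
  if segments = [] then []
  else
    let st := segments.reverse.foldl
      (fun (st : List String × List String) s =>
        if !st.2.isEmpty && pvBrk s seps then
          (st.1 ++ [String.join st.2.reverse], [s])   -- flush current chunk, start a new one
        else
          (st.1, st.2 ++ [s]))                        -- cur.append(s)
      ([], [])
    (st.1 ++ [String.join st.2.reverse]).reverse

-- ===== PRECONDITION & SPEC =====
-- Pre_ excludes (a) inputs containing an empty segment, on which A raises IndexError, and
-- (b) inputs whose last segment also occurs earlier at a position ending with a separator,
-- where A's `is` identity test on equal strings depends on CPython interning and its value
-- is an accident of the implementation.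
def Pre_join_similar_segments (segments : List String) (seps : List String) : Prop :=
  (∀ s ∈ segments, s ≠ "") ∧
  (∀ s ∈ segments.dropLast, pvBrk s seps = true → s ≠ segments.getLastD "")
instance (segments : List String) (seps : List String) : Decidable (Pre_join_similar_segments segments seps) := by unfold Pre_join_similar_segments; infer_instance

def pvWitness_join_similar_segments : List String × List String := (["ab.", "cd", "ef.", "gh"], [".", ";"])

def Spec_join_similar_segments (segments : List String) (seps : List String) (out : List String) : Prop := out = join_similar_segments_alt segments seps
instance (segments : List String) (seps : List String) (out : List String) : Decidable (Spec_join_similar_segments segments seps out) := by unfold Spec_join_similar_segments; infer_instance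

-- ===== CLAIM (what is proved, stated in full; the proofs are below) =====
def Claim_equal_join_similar_segments : Prop := ∀ (segments : List String) (seps : List String), Dom_join_similar_segments segments seps → Pre_join_similar_segments segments seps → Spec_join_similar_segments segments seps (join_similar_segments segments seps)

-- ===== LEMMAS AND PROOFS =====

-- A's loop body, with the fixed last element as a parameter
def pvStepA (seps : List String) (last : String) (result : List String) (segment : String) : List String :=
  let result := result.dropLast ++ [result.getLastD "" ++ segment]
  if pvBrk segment seps && segment != last then result ++ [""] else result

-- B as a recursive chunking function (right-to-left pass)
def pvRB (seps : List String) : List String → List String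
  | [] => []
  | s :: xs =>
    match pvRB seps xs with
    | [] => [s]
    | h :: t => if pvBrk s seps then s :: h :: t else (s ++ h) :: t

lemma pvRB_cons (seps : List String) (s : String) (xs : List String) :
    pvRB seps (s :: xs) =
      match pvRB seps xs with
      | [] => [s]
      | h :: t => if pvBrk s seps then s :: h :: t else (s ++ h) :: t := rfl

lemma pvJoin_cons (l : List String) : ∀ a : String, String.join (a :: l) = a ++ String.join l := by
  induction l with
  | nil => intro a; simp [String.join]
  | cons b l ih =>
    intro a
    have h1 : String.join (a :: b :: l) = String.join ((a ++ b) :: l) := by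
      simp [String.join]
    rw [h1, ih, ih b, String.append_assoc]

-- B's loop body
def pvStepB (seps : List String) (st : List String × List String) (s : String) : List String × List String :=
  if !st.2.isEmpty && pvBrk s seps then (st.1 ++ [String.join st.2.reverse], [s])
  else (st.1, st.2 ++ [s])

lemma pvB_state (seps : List String) (xs : List String) (hxs : xs ≠ []) :
    ∃ h t cur, pvRB seps xs = h :: t ∧ cur ≠ [] ∧ String.join cur.reverse = h ∧
      xs.foldr (fun s st => pvStepB seps st s) ([], []) = (t.reverse, cur) := by
  induction xs with
  | nil => exact absurd rfl hxs
  | cons s xs ih =>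
    cases xs with
    | nil =>
      refine ⟨s, [], [s], rfl, by simp, by simp [String.join], rfl⟩
    | cons s' xs' =>
      obtain ⟨h, t, cur, hrb, hcur, hjoin, hst⟩ := ih (by simp)
      simp only [List.foldr_cons] at hst ⊢
      rw [hst]
      by_cases hb : pvBrk s seps = true
      · refine ⟨s, h :: t, [s], ?_, by simp, by simp [String.join], ?_⟩
        · rw [pvRB_cons, hrb]; simp [hb]
        · unfold pvStepB
          simp [hcur, hb, hjoin]
      · refine ⟨s ++ h, t, cur ++ [s], ?_, by simp, ?_, ?_⟩
        · rw [pvRB_cons, hrb]; simp [hb]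
        · rw [List.reverse_append, List.reverse_singleton, List.singleton_append,
              pvJoin_cons, hjoin]
        · unfold pvStepB
          simp [hb]

lemma pvRB_eq_foldr (seps : List String) (xs : List String) :
    join_similar_segments_alt xs seps = pvRB seps xs := by
  unfold join_similar_segments_alt
  by_cases hxs : xs = []
  · subst hxs; rfl
  · simp only [if_neg hxs, List.foldl_reverse]
    obtain ⟨h, t, cur, hrb, _, hjoin, hst⟩ := pvB_state seps xs hxs
    show ((xs.foldr (fun s st => pvStepB seps st s) ([], [])).1 ++
        [String.join (xs.foldr (fun s st => pvStepB seps st s) ([], [])).2.reverse]).reverse = pvRB seps xs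
    rw [hst]
    simp [hjoin, hrb]

lemma pvStepA_concat (seps : List String) (last : String) (p : List String) (c s : String) :
    pvStepA seps last (p ++ [c]) s = p ++ pvStepA seps last [c] s := by
  unfold pvStepA
  simp only [List.dropLast_concat, List.getLastD_concat]
  split <;> simp

lemma pvFoldA_concat (seps : List String) (last : String) (xs : List String) :
    ∀ (p : List String) (c : String),
      xs.foldl (pvStepA seps last) (p ++ [c]) = p ++ xs.foldl (pvStepA seps last) [c] := by
  induction xs with
  | nil => intro p c; simp
  | cons s xs ih =>
    intro p c
    simp only [List.foldl_cons, pvStepA_concat]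
    by_cases hb : (pvBrk s seps && s != last) = true
    · have h1 : pvStepA seps last [c] s = [c ++ s] ++ [""] := by
        unfold pvStepA; simp [hb]
      rw [h1, ← List.append_assoc, ih (p ++ [c ++ s]) "", ih [c ++ s] ""]
      simp
    · have h1 : pvStepA seps last [c] s = [c ++ s] := by
        unfold pvStepA; simp [hb]
      rw [h1]
      exact ih p (c ++ s)

lemma pvMain (seps : List String) (last : String) (xs : List String) :
    ∀ (c : String), xs ≠ [] → (∀ s ∈ xs.dropLast, pvBrk s seps = true → s ≠ last) →
      xs.getLast? = some last →
      ∃ h t, pvRB seps xs = h :: t ∧ xs.foldl (pvStepA seps last) [c] = (c ++ h) :: t := by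
  induction xs with
  | nil => intro _ h; exact absurd rfl h
  | cons s xs ih =>
    intro c _ hdl hlast
    cases xs with
    | nil =>
      have hs : s = last := by simpa using hlast
      refine ⟨s, [], rfl, ?_⟩
      simp only [List.foldl_cons, List.foldl_nil]
      unfold pvStepA
      subst hs
      simp
    | cons s' xs' =>
      have hne : pvBrk s seps = true → s ≠ last := by
        apply hdl; simp [List.dropLast_cons_of_ne_nil]
      have hdl' : ∀ t ∈ (s' :: xs').dropLast, pvBrk t seps = true → t ≠ last := by
        intro t ht
        apply hdl
        simp only [List.dropLast_cons_of_ne_nil (by simp : s' :: xs' ≠ [])]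
        exact List.mem_cons_of_mem _ ht
      have hlast' : (s' :: xs').getLast? = some last := by
        rw [← hlast]; exact (List.getLast?_cons_cons ..).symm
      obtain ⟨h, t, hrb, hfold⟩ := ih "" (by simp) hdl' hlast'
      obtain ⟨h2, t2, hrb2, hfold2⟩ := ih (c ++ s) (by simp) hdl' hlast'
      simp only [List.foldl_cons]
      by_cases hb : pvBrk s seps = true
      · refine ⟨s, h :: t, ?_, ?_⟩
        · rw [pvRB_cons, hrb]; simp [hb]
        · have hst : pvStepA seps last [c] s = [c ++ s] ++ [""] := by
            unfold pvStepA; simp [hb, hne hb]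
          rw [hst, ← List.foldl_cons, pvFoldA_concat, hfold]
          simp
      · refine ⟨s ++ h, t, ?_, ?_⟩
        · rw [pvRB_cons, hrb]; simp [hb]
        · have hst : pvStepA seps last [c] s = [c ++ s] := by
            unfold pvStepA; simp [hb]
          obtain ⟨e1, e2⟩ : h2 = h ∧ t2 = t := by
            rw [hrb] at hrb2; exact ⟨(List.cons.injEq .. ▸ hrb2).1.symm, ((List.cons.injEq ..) ▸ hrb2).2.symm⟩
          rw [hst, ← List.foldl_cons, hfold2, e1, e2, String.append_assoc]

-- ===== VERDICT (by name: the statement is the Claim_ definition above) =====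
theorem join_similar_segments_spec : Claim_equal_join_similar_segments := by
  intro segments seps _ hpre
  unfold Spec_join_similar_segments
  rw [pvRB_eq_foldr]
  unfold join_similar_segments
  by_cases hnil : segments = []
  · subst hnil; rfl
  · simp only [if_neg hnil]
    have hlast : segments.getLast? = some (segments.getLastD "") := by
      cases segments with
      | nil => exact absurd rfl hnil
      | cons a l => simp [List.getLastD_eq_getLast?, List.getLast?_cons]
    obtain ⟨h, t, hrb, hfold⟩ :=
      pvMain seps (segments.getLastD "") segments "" hnil hpre.2 hlast
    have : segments.foldl (pvStepA seps (segments.getLastD "")) [""] = ("" ++ h) :: t := hfold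
    simp only [String.empty_append] at this
    rw [hrb]
    exact this
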